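-- pv_equiv track=rewrite | github.com/bneises/tip-marketplace-uncertified | Integrations/EmailUtilities/Managers/EmailManager.py | get_content_type
-- ===== SOURCE A (Python) =====
-- def get_content_type(headers, multipart=False):
--     ch = {}
--     content_type = ""
--     for k, v in headers:
--         # make sure we are working with strings only
--         v = str(v)
--         k = k.lower()  # Lot of lowers, pre-compute :) .
--         if multipart:
--             if k in ch:
--                 ch[k].append(v)
--             else:
--                 ch[k] = [v]
--         else:  # if not multipart, store only content-xx related header with part
--             if k.startswith('content'):  # otherwise, we got all header headers
--                 if k in ch:
--                     ch[k].append(v)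
--                 else:
--                     ch[k] = [v]
--     val = ch.get('content-type')
--     if val:
--         header_val = val[-1]
--         content_type = header_val.split(';', 1)[0].strip()
--     return content_type
-- ===== SOURCE B (Python) =====
-- def get_content_type(headers, multipart=False):
--     # single pass keeping only the last content-type value; no dict needed
--     last = None
--     for k, v in headers:
--         v = str(v)
--         if k.lower() == 'content-type':
--             last = v
--     if last is not None:
--         return last.split(';', 1)[0].strip()
--     return ''
-- ===== Notes on version B (the rewrite author's own statement) =====
-- stated objective: simpler
-- what changed: B replaces A's dict-of-lists grouping (and the multipart branch, which never affects the result) with a single pass that keeps only the last value whose lowered key is 'content-type', then splits and strips it.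
import Mathlib
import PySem

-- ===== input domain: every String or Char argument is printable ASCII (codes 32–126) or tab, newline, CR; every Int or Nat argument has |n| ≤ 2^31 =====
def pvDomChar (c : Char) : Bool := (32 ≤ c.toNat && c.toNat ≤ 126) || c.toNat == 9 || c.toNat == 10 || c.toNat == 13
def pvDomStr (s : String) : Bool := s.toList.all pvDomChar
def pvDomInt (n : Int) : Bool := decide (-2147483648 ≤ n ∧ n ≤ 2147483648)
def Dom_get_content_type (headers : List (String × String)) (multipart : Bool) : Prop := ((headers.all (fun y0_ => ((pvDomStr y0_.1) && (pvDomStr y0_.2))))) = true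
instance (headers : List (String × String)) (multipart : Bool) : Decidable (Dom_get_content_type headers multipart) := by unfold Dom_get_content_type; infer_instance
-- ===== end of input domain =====

-- B replaces A's dict-of-lists grouping by a single scalar holding the last content-type value (objective: simpler).

-- ===== PORT A =====
-- one iteration of A's `for k, v in headers:` loop body (str(v) is the identity on strings)
def pvAStep (multipart : Bool) (ch : PySem.Dict String (List String)) (kv : String × String) :
    PySem.Dict String (List String) :=
  let v := kv.2
  let k := PySem.Str.lower kv.1
  if multipart then
    if ch.contains k then ch.insert k (ch.getD k [] ++ [v]) else ch.insert k [v]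
  else
    if PySem.Str.startswith k "content" then
      if ch.contains k then ch.insert k (ch.getD k [] ++ [v]) else ch.insert k [v]
    else ch

def get_content_type (headers : List (String × String)) (multipart : Bool) : String :=
  -- ch = the dict built by the loop; val = ch.get('content-type'); `if val:` is truthy ↔ present and non-empty
  match (headers.foldl (pvAStep multipart) PySem.Dict.empty).get? "content-type" with
  | none => ""
  | some val =>
    if val.isEmpty then ""
    else
      match PySem.List.pyGet? val (-1) with        -- header_val = val[-1]
      | none => ""                                 -- unreachable: val is non-empty
      | some header_val =>
        PySem.Str.strip (((PySem.Str.splitMax? header_val ";" 1).getD []).headD "")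

-- ===== PORT B =====
def pvBStep (acc : Option String) (kv : String × String) : Option String :=
  if PySem.Str.lower kv.1 == "content-type" then some kv.2 else acc

def get_content_type_alt (headers : List (String × String)) (multipart : Bool) : String :=
  match headers.foldl pvBStep none with
  | some last => PySem.Str.strip (((PySem.Str.splitMax? last ";" 1).getD []).headD "")
  | none => ""

-- ===== PRECONDITION & SPEC =====
def Spec_get_content_type (headers : List (String × String)) (multipart : Bool) (out : String) : Prop := out = get_content_type_alt headers multipart
instance (headers : List (String × String)) (multipart : Bool) (out : String) : Decidable (Spec_get_content_type headers multipart out) := by unfold Spec_get_content_type; infer_instance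

-- ===== CLAIM (what is proved, stated in full; the proofs are below) =====
def Claim_equal_get_content_type : Prop := ∀ (headers : List (String × String)) (multipart : Bool), Dom_get_content_type headers multipart → Spec_get_content_type headers multipart (get_content_type headers multipart)

-- ===== LEMMAS AND PROOFS =====

-- the content-type values collected by either loop, in order
def pvCT (headers : List (String × String)) : List String :=
  (headers.filter (fun kv => PySem.Str.lower kv.1 == "content-type")).map (·.2)

theorem pvA_inv (mp : Bool) (headers : List (String × String)) :
    ∀ ch : PySem.Dict String (List String),
      (headers.foldl (pvAStep mp) ch).get? "content-type" =
        match ch.get? "content-type" with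
        | none => if pvCT headers = [] then none else some (pvCT headers)
        | some l => some (l ++ pvCT headers) := by
  induction headers with
  | nil => intro ch; rcases h : ch.get? "content-type" with _ | l <;> simp [pvCT, h]
  | cons kv rest ih =>
    intro ch
    by_cases hk : PySem.Str.lower kv.1 = "content-type"
    · have hct : pvCT (kv :: rest) = kv.2 :: pvCT rest := by simp [pvCT, hk]
      have hstep : (pvAStep mp ch kv).get? "content-type" =
          some ((ch.get? "content-type").getD [] ++ [kv.2]) := by
        unfold pvAStep
        simp only [hk, show PySem.Str.startswith "content-type" "content" = true from by decide]
        rcases hc : ch.get? "content-type" with _ | l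
        · have hcontains : ch.contains "content-type" = false := by
            rw [PySem.Dict.contains_eq_isSome_get?, hc]; rfl
          cases mp <;> simp [hcontains, PySem.Dict.get?_insert_self]
        · have hcontains : ch.contains "content-type" = true := by
            rw [PySem.Dict.contains_eq_isSome_get?, hc]; rfl
          have hgd : ch.getD "content-type" [] = l := by
            simp [PySem.Dict.getD_eq_get?_getD, hc]
          cases mp <;> simp [hcontains, hgd, PySem.Dict.get?_insert_self]
      rw [List.foldl_cons, ih (pvAStep mp ch kv), hstep, hct]
      rcases ch.get? "content-type" with _ | l
      · rcases h : pvCT rest with _ | ⟨w, ws⟩ <;> simp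
      · rcases h : pvCT rest with _ | ⟨w, ws⟩ <;> simp
    · have hct : pvCT (kv :: rest) = pvCT rest := by simp [pvCT, hk]
      have hne : ("content-type" : String) ≠ PySem.Str.lower kv.1 := fun h => hk h.symm
      have key : ∀ l : List String,
          (ch.insert (PySem.Str.lower kv.1) l).get? "content-type" = ch.get? "content-type" :=
        fun l => PySem.Dict.get?_insert_of_ne ch l hne
      have hstep : (pvAStep mp ch kv).get? "content-type" = ch.get? "content-type" := by
        unfold pvAStep
        cases mp <;> simp only [Bool.false_eq_true, if_false, if_true] <;> split_ifs <;>
          simp [key]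
      rw [List.foldl_cons, ih (pvAStep mp ch kv), hstep, hct]

theorem pvB_inv (headers : List (String × String)) :
    ∀ acc : Option String,
      headers.foldl pvBStep acc =
        match (pvCT headers).getLast? with
        | none => acc
        | some v => some v := by
  induction headers with
  | nil => intro acc; simp [pvCT]
  | cons kv rest ih =>
    intro acc
    by_cases hk : PySem.Str.lower kv.1 = "content-type"
    · have hct : pvCT (kv :: rest) = kv.2 :: pvCT rest := by simp [pvCT, hk]
      have hstep : pvBStep acc kv = some kv.2 := by simp [pvBStep, hk]
      rw [List.foldl_cons, hstep, ih, hct]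
      rcases h : pvCT rest with _ | ⟨w, ws⟩
      · simp
      · rw [List.getLast?_cons_cons]
        rcases hl : (w :: ws).getLast? with _ | u
        · simp at hl
        · simp
    · have hct : pvCT (kv :: rest) = pvCT rest := by simp [pvCT, hk]
      have hstep : pvBStep acc kv = acc := by simp [pvBStep, hk]
      rw [List.foldl_cons, hstep, ih, hct]

theorem pvGet_neg_one (l : List String) (h : l ≠ []) :
    PySem.List.pyGet? l (-1) = l.getLast? := by
  simp [PySem.List.pyGet?, PySem.List.pyIdx?]
  rw [if_pos (Nat.one_le_iff_ne_zero.2 (by simpa using h))]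
  simp [List.getLast?_eq_getElem?]

-- ===== VERDICT (by name: the statement is the Claim_ definition above) =====
theorem get_content_type_spec : Claim_equal_get_content_type := by
  intro headers multipart _
  unfold Spec_get_content_type get_content_type get_content_type_alt
  rw [pvA_inv multipart headers PySem.Dict.empty, pvB_inv headers none]
  simp only [PySem.Dict.get?_empty]
  rcases h : pvCT headers with _ | ⟨w, ws⟩
  · simp
  · have hne : (w :: ws) ≠ ([] : List String) := by simp
    simp only [if_neg (by simp : ¬(w :: ws) = [])]
    rw [pvGet_neg_one _ hne]
    rcases hl : (w :: ws).getLast? with _ | u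
    · simp at hl
    · simp [List.isEmpty_cons]
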